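-- pv_equiv track=rewrite | github.com/PrinceSinghhub/GFG-Questions | Count divisors of product of array elements.py | countDivisorsMult
-- ===== SOURCE A (Python) =====
-- def countDivisorsMult(a, n):
--     #Code here
--     prod = 1
--     for i in range(len(a)):
--         prod *= a[i]
--     p = 2
--     prime = []
--     while prod!=1:
--         if prod%p == 0:
--             prod //=p
--             prime.append(p)
--             continue
--         p += 1
--     d = {i:prime.count(i) for i in prime}
--     No_of_factors = 1
--     for key,value in d.items():
--         No_of_factors *= (1+value)
--     return No_of_factors
-- ===== SOURCE B (Python) =====
-- def countDivisorsMult(a, n):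
--     # Factorize each element separately by trial division up to sqrt,
--     # accumulating prime exponents; never forms the (possibly huge) product.
--     exp = {}
--     for x in a:
--         if x < 0:
--             x = -x
--         d = 2
--         while d * d <= x:
--             while x % d == 0:
--                 exp[d] = exp.get(d, 0) + 1
--                 x //= d
--             d += 1
--         if x > 1:
--             exp[x] = exp.get(x, 0) + 1
--     res = 1
--     for e in exp.values():
--         res *= e + 1
--     return res
-- ===== Notes on version B (the rewrite author's own statement) =====
-- stated objective: faster
-- what changed: Instead of multiplying all elements into one huge product and peeling its prime factors by incrementing a trial divisor up to the largest prime factor of the product, B factorizes each element separately by trial division up to its square root and accumulates the prime exponents in a counter, so the big product is never formed.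
import Mathlib
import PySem

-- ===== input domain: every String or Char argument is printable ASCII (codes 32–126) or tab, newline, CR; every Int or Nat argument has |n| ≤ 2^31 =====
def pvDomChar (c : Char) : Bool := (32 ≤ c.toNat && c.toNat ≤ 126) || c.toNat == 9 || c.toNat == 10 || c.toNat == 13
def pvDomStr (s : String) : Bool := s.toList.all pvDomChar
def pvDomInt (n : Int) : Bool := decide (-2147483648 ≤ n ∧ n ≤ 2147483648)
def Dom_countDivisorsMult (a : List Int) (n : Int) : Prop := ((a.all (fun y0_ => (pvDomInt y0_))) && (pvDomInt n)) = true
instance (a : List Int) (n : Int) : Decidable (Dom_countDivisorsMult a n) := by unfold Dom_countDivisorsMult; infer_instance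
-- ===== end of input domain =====

-- B factorizes each element separately by trial division up to its square root instead of
-- peeling prime factors off the full product one trial divisor at a time (objective: faster).

-- ===== PORT A =====
-- A's 'while prod != 1' loop, with fuel: 2*|prod|+2 steps are proved sufficient whenever
-- prod ≥ 1 (the Python loop diverges for prod ≤ 0; those inputs are outside Pre_ below).
def pvAWhile : Nat → Int → Int → List Int → List Int
  | 0, _, _, prime => prime
  | fuel+1, prod, p, prime =>
    if prod ≠ 1 then
      (if PySem.Int.mod prod p == 0 then
        pvAWhile fuel (PySem.Int.floordiv prod p) p (prime ++ [p])
      else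
        pvAWhile fuel prod (p+1) prime)
    else prime

def countDivisorsMult (a : List Int) (n : Int) : Int :=
  let prod := (PySem.List.pyRange 0 (PySem.List.len a)).foldl
                (fun acc i => acc * PySem.List.pyGetD a i 0) 1
  let prime := pvAWhile (2 * prod.natAbs + 2) prod 2 []
  let d := prime.foldl (fun d i => d.insert i ((PySem.List.count prime i : Int))) PySem.Dict.empty
  d.items.foldl (fun acc kv => acc * (1 + kv.2)) 1

-- ===== PORT B =====
-- inner 'while x % d == 0' loop of Source B; fuel |x|+1 suffices (x shrinks every step)
def pvBInner : Nat → Int → Int → PySem.Dict Int Int → Int × PySem.Dict Int Int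
  | 0, x, _, exp => (x, exp)
  | fuel+1, x, d, exp =>
    if PySem.Int.mod x d == 0 then
      pvBInner fuel (PySem.Int.floordiv x d) d (exp.insert d (exp.getD d 0 + 1))
    else (x, exp)

-- outer 'while d*d <= x' loop of Source B followed by the trailing 'if x > 1'; fuel |x|+2 suffices
def pvBOuter : Nat → Int → Int → PySem.Dict Int Int → PySem.Dict Int Int
  | 0, _, _, exp => exp
  | fuel+1, x, d, exp =>
    if d * d ≤ x then
      let r := pvBInner (x.natAbs + 1) x d exp
      pvBOuter fuel r.1 (d+1) r.2
    else if 1 < x then exp.insert x (exp.getD x 0 + 1) else exp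

def countDivisorsMult_alt (a : List Int) (n : Int) : Int :=
  let exp := a.foldl (fun exp x0 =>
    let x := if x0 < 0 then -x0 else x0
    pvBOuter (x.natAbs + 2) x 2 exp) PySem.Dict.empty
  exp.values.foldl (fun res e => res * (e + 1)) 1

-- ===== PRECONDITION & SPEC =====
-- Pre_ excludes exactly the inputs on which the Python A never returns: if the product of the
-- elements is 0 its loop divides 0 by 2 forever, and if it is negative 'prod' never reaches 1.
def Pre_countDivisorsMult (a : List Int) (n : Int) : Prop := 0 < a.foldl (· * ·) 1
instance (a : List Int) (n : Int) : Decidable (Pre_countDivisorsMult a n) := by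
  unfold Pre_countDivisorsMult; infer_instance

def pvWitness_countDivisorsMult : List Int × Int := ([2, -3, -4], 3)

def Spec_countDivisorsMult (a : List Int) (n : Int) (out : Int) : Prop := out = countDivisorsMult_alt a n
instance (a : List Int) (n : Int) (out : Int) : Decidable (Spec_countDivisorsMult a n out) := by
  unfold Spec_countDivisorsMult; infer_instance

-- ===== CLAIM (what is proved, stated in full; the proofs are below) =====
def Claim_equal_countDivisorsMult : Prop := ∀ (a : List Int) (n : Int), Dom_countDivisorsMult a n → Pre_countDivisorsMult a n → Spec_countDivisorsMult a n (countDivisorsMult a n)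

-- ===== LEMMAS AND PROOFS =====

-- a multiplicative fold is 'init * product'
theorem pvFoldlMul {α : Type} (l : List α) (g : α → Int) :
    ∀ c : Int, l.foldl (fun acc v => acc * g v) c = c * (l.map g).prod := by
  induction l with
  | nil => intro c; simp
  | cons x t ih => intro c; simp [ih, mul_assoc]

-- under the trial-division invariant 'nothing in [2,p) divides m', p is at most minFac m
theorem pvLeMinFac {m p : Nat} (hm : 2 ≤ m) (hinv : ∀ q, 2 ≤ q → q < p → ¬ q ∣ m) :
    p ≤ m.minFac := by
  by_contra h
  exact hinv m.minFac (Nat.minFac_prime (by omega)).two_le (by omega) (Nat.minFac_dvd m)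

-- A's while loop computes the prime factor list of prod (in Nat form), given enough fuel
theorem pvAWhile_eq : ∀ (fuel : Nat) (m p : Nat) (acc : List Int),
    1 ≤ m → 2 ≤ p → (∀ q, 2 ≤ q → q < p → ¬ q ∣ m) → m + (m + 2 - p) ≤ fuel →
    pvAWhile fuel (m : Int) (p : Int) acc
      = acc ++ (Nat.primeFactorsList m).map (fun q : Nat => (q : Int)) := by
  intro fuel
  induction fuel with
  | zero => intro m p acc h1 h2 hinv hf; exact absurd hf (by omega)
  | succ fuel ih =>
    intro m p acc h1 h2 hinv hf
    by_cases hm : m = 1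
    · subst hm; simp [pvAWhile]
    · have hm2 : 2 ≤ m := by omega
      have hple : p ≤ m.minFac := pvLeMinFac hm2 hinv
      have hpm : p ≤ m := le_trans hple (Nat.minFac_le (by omega))
      have hne : ((m : Int) ≠ 1) := by exact_mod_cast (by omega : m ≠ 1)
      rw [pvAWhile, if_pos hne]
      by_cases hdvd : p ∣ m
      · have hmod : (PySem.Int.mod (m : Int) (p : Int) == 0) = true := by
          rw [PySem.Int.mod_natCast, Nat.dvd_iff_mod_eq_zero.mp hdvd]; rfl
        rw [if_pos hmod, PySem.Int.floordiv_natCast]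
        have hpfac : p = m.minFac := le_antisymm hple (Nat.minFac_le_of_dvd h2 hdvd)
        have h1' : 1 ≤ m / p := (Nat.one_le_div_iff (by omega)).mpr hpm
        have hm'lt : m / p < m := Nat.div_lt_self (by omega) (by omega)
        have hinv' : ∀ q, 2 ≤ q → q < p → ¬ q ∣ m / p :=
          fun q hq hqp hdq => hinv q hq hqp (hdq.trans (Nat.div_dvd_of_dvd hdvd))
        rw [ih (m / p) p (acc ++ [(p : Int)]) h1' h2 hinv' (by omega)]
        have hfac : Nat.primeFactorsList m = p :: Nat.primeFactorsList (m / p) := by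
          obtain ⟨j, rfl⟩ : ∃ j, m = j + 2 := ⟨m - 2, by omega⟩
          rw [Nat.primeFactorsList_add_two, ← hpfac]
        rw [hfac]; simp
      · have hmodnz : m % p ≠ 0 := fun h => hdvd (Nat.dvd_iff_mod_eq_zero.mpr h)
        rw [if_neg (by simp [PySem.Int.mod_natCast]; exact_mod_cast hdvd)]
        have hinv' : ∀ q, 2 ≤ q → q < p + 1 → ¬ q ∣ m := by
          intro q hq hqp hdq
          rcases Nat.lt_succ_iff_lt_or_eq.mp hqp with h | h
          · exact hinv q hq h hdq
          · subst h; exact hdvd hdq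
        have hcast : ((p : Int) + 1) = ((p + 1 : Nat) : Int) := by push_cast; ring
        rw [hcast, ih m (p + 1) acc h1 (by omega) hinv' (by omega)]

-- a fold of inserts whose value depends only on the key: last write wins
theorem pvGetFoldlInsertConst (f : Int → Int) :
    ∀ (l : List Int) (d : PySem.Dict Int Int) (k : Int),
    (l.foldl (fun d x => d.insert x (f x)) d).get? k = if k ∈ l then some (f k) else d.get? k := by
  intro l
  induction l with
  | nil => intro d k; simp
  | cons x t ih =>
    intro d k
    simp only [List.foldl_cons, ih]
    by_cases hk : k ∈ t
    · simp [hk]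
    · by_cases hkx : k = x
      · subst hkx; simp [hk, PySem.Dict.get?_insert_self]
      · simp [hk, hkx, PySem.Dict.get?_insert_of_ne _ _ hkx]

-- characterization of A's result: a product of (1 + multiplicity) over the distinct primes
theorem pvAVal (a : List Int) (n : Int) (m : Nat) (hm : 1 ≤ m)
    (hprod : (PySem.List.pyRange 0 (PySem.List.len a)).foldl
                (fun acc i => acc * PySem.List.pyGetD a i 0) 1 = (m : Int)) :
    countDivisorsMult a n =
      ((PySem.Set.ofList ((Nat.primeFactorsList m).map (fun q : Nat => (q : Int)))).map
        (fun k => 1 + (((Nat.primeFactorsList m).map (fun q : Nat => (q : Int))).count k : Int))).prod := by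
  unfold countDivisorsMult
  simp only [hprod, Int.natAbs_natCast]
  have hw := pvAWhile_eq (2 * m + 2) m 2 [] hm (le_refl 2) (by omega) (by omega)
  simp only [Nat.cast_ofNat] at hw
  rw [hw]
  rw [List.nil_append]
  set P : List Int := (Nat.primeFactorsList m).map (fun q : Nat => (q : Int)) with hP
  set D : PySem.Dict Int Int :=
    P.foldl (fun d i => d.insert i ((PySem.List.count P i : Int))) PySem.Dict.empty with hD
  have hkeys : D.keys = PySem.Set.ofList P := by
    rw [hD, PySem.Dict.keys_foldl_insert, PySem.Dict.keys_empty, PySem.Set.ofList_eq_foldl]; rfl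
  have hnodup : D.keys.Nodup := by
    rw [hkeys]; exact PySem.Set.nodup_ofList P
  rw [PySem.Dict.items_eq_map_keys D hnodup 0]
  rw [pvFoldlMul, one_mul, List.map_map, hkeys]
  congr 1
  apply List.map_congr_left
  intro k hk
  have hkP : k ∈ P := (PySem.Set.mem_ofList P k).mp hk
  have hget : D.get? k = some ((PySem.List.count P k : Int)) := by
    rw [hD, pvGetFoldlInsertConst, if_pos hkP]
  simp [PySem.Dict.getD_of_get?_eq_some D 0 hget]

-- factor lists: d^k * y (nothing below d divides it) lists k copies of d, then y's factors
theorem pvRepFactors (d y : Nat) (hy : 1 ≤ y) (hd : 2 ≤ d) :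
    ∀ k : Nat, (∀ q, 2 ≤ q → q < d → ¬ q ∣ d ^ k * y) →
    Nat.primeFactorsList (d ^ k * y) = List.replicate k d ++ Nat.primeFactorsList y := by
  intro k
  induction k with
  | zero => intro _; simp
  | succ k ih =>
    intro hinv
    have hx2 : 2 ≤ d ^ (k+1) * y := by
      calc 2 ≤ d := hd
        _ = d * 1 := by ring
        _ ≤ d ^ (k+1) * y := by
          apply Nat.mul_le_mul _ hy
          exact Nat.le_self_pow (by omega) d
    have hdvd : d ∣ d ^ (k+1) * y := Dvd.dvd.mul_right (dvd_pow_self d (by omega)) y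
    have hmf : (d ^ (k+1) * y).minFac = d :=
      le_antisymm (Nat.minFac_le_of_dvd hd hdvd) (pvLeMinFac hx2 hinv)
    have hdiv : d ^ (k+1) * y / d = d ^ k * y := by
      rw [pow_succ, mul_comm (d^k) d, mul_assoc, Nat.mul_div_cancel_left _ (by omega)]
    obtain ⟨j, hj⟩ : ∃ j, d ^ (k+1) * y = j + 2 := ⟨d ^ (k+1) * y - 2, by omega⟩
    rw [hj, Nat.primeFactorsList_add_two, ← hj, hmf, hdiv]
    rw [ih (fun q hq hqd hdq => hinv q hq hqd (hdq.trans ⟨d, by ring⟩))]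
    simp [List.replicate_succ]

-- B's inner division loop divides out the full d-power, counting each division
theorem pvBInner_eq : ∀ (fuel x d : Nat) (exp : PySem.Dict Int Int),
    1 ≤ x → 2 ≤ d → x < fuel →
    ∃ k y, x = d ^ k * y ∧ ¬ d ∣ y ∧ 1 ≤ y ∧
      pvBInner fuel (x : Int) (d : Int) exp
        = ((y : Int), (List.replicate k (d : Int)).foldl
            (fun e p => e.insert p (e.getD p 0 + 1)) exp) := by
  intro fuel
  induction fuel with
  | zero => intro x d exp h1 h2 hf; omega
  | succ fuel ih =>
    intro x d exp h1 h2 hf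
    by_cases hdvd : d ∣ x
    · have hdx : d ≤ x := Nat.le_of_dvd (by omega) hdvd
      have hmod : (PySem.Int.mod (x : Int) (d : Int) == 0) = true := by
        rw [PySem.Int.mod_natCast, Nat.dvd_iff_mod_eq_zero.mp hdvd]; rfl
      have hlt : x / d < fuel := by
        have := Nat.div_lt_self (by omega : 0 < x) (by omega : 1 < d)
        omega
      have h1' : 1 ≤ x / d := (Nat.one_le_div_iff (by omega)).mpr hdx
      obtain ⟨k, y, hxy, hndy, h1y, heq⟩ := ih (x / d) d (exp.insert d (exp.getD d 0 + 1)) h1' h2 hlt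
      refine ⟨k + 1, y, ?_, hndy, h1y, ?_⟩
      · rw [pow_succ, mul_comm (d^k) d, mul_assoc, ← hxy, Nat.mul_div_cancel' hdvd]
      · rw [pvBInner, if_pos hmod, PySem.Int.floordiv_natCast, heq]
        simp [List.replicate_succ]
    · refine ⟨0, x, by simp, hdvd, h1, ?_⟩
      rw [pvBInner, if_neg ?_]
      · simp
      · rw [PySem.Int.mod_natCast]
        simp only [beq_iff_eq, Nat.cast_eq_zero]
        exact fun h => hdvd (Nat.dvd_iff_mod_eq_zero.mpr h)

-- B's outer trial-division loop pushes exactly the prime factor list of x into the counter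
theorem pvBOuter_eq : ∀ (fuel : Nat), ∀ (x d : Nat) (exp : PySem.Dict Int Int),
    1 ≤ x → 2 ≤ d → (∀ q, 2 ≤ q → q < d → ¬ q ∣ x) → 1 + (x + 2 - d) ≤ fuel →
    pvBOuter fuel (x : Int) (d : Int) exp
      = ((Nat.primeFactorsList x).map (fun q : Nat => (q : Int))).foldl
          (fun e p => e.insert p (e.getD p 0 + 1)) exp := by
  intro fuel
  induction fuel with
  | zero => intro x d exp h1 h2 hinv hf; omega
  | succ fuel ih =>
    intro x d exp h1 h2 hinv hf
    by_cases hdd : d * d ≤ x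
    · have hdx : d ≤ x := le_trans (Nat.le_mul_of_pos_left d (by omega)) hdd
      have hddI : ((d : Int) * (d : Int) ≤ (x : Int)) := by exact_mod_cast hdd
      rw [pvBOuter, if_pos hddI]
      have hxa : ((x : Int)).natAbs = x := Int.natAbs_natCast x
      rw [hxa]
      obtain ⟨k, y, hxy, hndy, h1y, heq⟩ := pvBInner_eq (x + 1) x d exp h1 h2 (by omega)
      rw [heq]
      have hyx : y ≤ x := by
        rw [hxy]; exact Nat.le_mul_of_pos_left y (by positivity)
      have hinv' : ∀ q, 2 ≤ q → q < d + 1 → ¬ q ∣ y := by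
        intro q hq hqd hdq
        rcases Nat.lt_succ_iff_lt_or_eq.mp hqd with h | h
        · exact hinv q hq h (hdq.trans (by rw [hxy]; exact dvd_mul_left y (d^k)))
        · subst h; exact hndy hdq
      have hcast : ((d : Int) + 1) = ((d + 1 : Nat) : Int) := by push_cast; ring
      simp only [hcast]
      rw [ih y (d + 1) _ h1y (by omega) hinv' (by omega)]
      rw [hxy, pvRepFactors d y h1y h2 k (by rw [← hxy]; exact hinv)]
      rw [List.map_append, List.foldl_append, List.map_replicate]
    · have hddI : ¬ ((d : Int) * (d : Int) ≤ (x : Int)) := by exact_mod_cast hdd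
      rw [pvBOuter, if_neg hddI]
      by_cases hx1 : 1 < x
      · have hprime : Nat.Prime x := by
          rw [Nat.prime_def_lt']
          refine ⟨hx1, fun q hq hqx hdq => ?_⟩
          by_cases hqd : q < d
          · exact hinv q hq hqd hdq
          · obtain ⟨c, hc⟩ := hdq
            have hc2 : 2 ≤ c := by
              by_contra hlt
              push_neg at hlt
              interval_cases c
              · simp at hc; omega
              · simp at hc; omega
            have hcd : c < d := by
              by_contra hcd
              push_neg at hcd
              have h5 : d * d ≤ c * q := Nat.mul_le_mul hcd (by omega)
              have h6 : c * q = x := by rw [hc]; ring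
              omega
            exact hinv c hc2 hcd ⟨q, by rw [hc]; ring⟩
        rw [if_pos (by exact_mod_cast hx1), Nat.primeFactorsList_prime hprime]
        simp
      · have hx : x = 1 := by omega
        subst hx
        rw [if_neg (by norm_num)]
        simp

-- B's fold over the elements accumulates the concatenation of the per-element factor lists
theorem pvBFold : ∀ (a : List Int) (exp : PySem.Dict Int Int), (∀ x ∈ a, x ≠ 0) →
    a.foldl (fun exp x0 =>
      let x := if x0 < 0 then -x0 else x0
      pvBOuter (x.natAbs + 2) x 2 exp) exp
    = (a.flatMap (fun v => (Nat.primeFactorsList v.natAbs).map (fun q : Nat => (q : Int)))).foldl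
        (fun e p => e.insert p (e.getD p 0 + 1)) exp := by
  intro a
  induction a with
  | nil => intro exp _; simp
  | cons x0 t ih =>
    intro exp hnz
    have hx0 : x0 ≠ 0 := hnz x0 (List.mem_cons_self)
    have habs : (if x0 < 0 then -x0 else x0) = ((x0.natAbs : Nat) : Int) := by
      rw [Int.natCast_natAbs]
      by_cases h : x0 < 0
      · rw [abs_of_neg h, if_pos h]
      · rw [abs_of_nonneg (not_lt.mp h), if_neg h]
    simp only [List.foldl_cons, habs, Int.natAbs_natCast]
    have h1 : 1 ≤ x0.natAbs := by
      have := Int.natAbs_ne_zero.mpr hx0; omega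
    have hw := pvBOuter_eq (x0.natAbs + 2) x0.natAbs 2 exp h1 (le_refl 2) (by omega) (by omega)
    simp only [Nat.cast_ofNat] at hw
    rw [hw, ih _ (fun x hx => hnz x (List.mem_cons_of_mem _ hx))]
    rw [List.flatMap_cons, List.foldl_append]

-- the factor list of a product of nonzero naturals: concatenation, up to permutation
theorem pvPermNat : ∀ l : List Nat, (∀ m ∈ l, m ≠ 0) →
    (l.prod.primeFactorsList).Perm (l.flatMap Nat.primeFactorsList) := by
  intro l
  induction l with
  | nil => intro _; simp
  | cons x t ih =>
    intro hnz
    have hx : x ≠ 0 := hnz x (List.mem_cons_self)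
    have ht : ∀ m ∈ t, m ≠ 0 := fun m hm => hnz m (List.mem_cons_of_mem _ hm)
    have htp : t.prod ≠ 0 := List.prod_ne_zero fun h => ht 0 h rfl
    rw [List.prod_cons, List.flatMap_cons]
    exact (Nat.perm_primeFactorsList_mul hx htp).trans ((ih ht).append_left _)

-- |product| = product of absolute values
theorem pvNatAbsProd : ∀ l : List Int, l.prod.natAbs = (l.map Int.natAbs).prod := by
  intro l
  induction l with
  | nil => simp
  | cons x t ih => simp [Int.natAbs_mul, ih]

-- ===== VERDICT (by name: the statement is the Claim_ definition above) =====
theorem countDivisorsMult_spec : Claim_equal_countDivisorsMult := by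
  unfold Claim_equal_countDivisorsMult
  intro a n _ hpre
  unfold Pre_countDivisorsMult at hpre
  unfold Spec_countDivisorsMult
  have hfold : a.foldl (· * ·) 1 = a.prod := by
    simpa using pvFoldlMul a (fun v => v) 1
  have hprodpos : 0 < a.prod := hfold ▸ hpre
  have hnz : ∀ x ∈ a, x ≠ 0 := by
    intro x hx h0
    subst h0
    exact absurd (List.prod_eq_zero hx) (by omega)
  set N := a.prod.natAbs with hN
  have hNpos : 1 ≤ N := by
    have := Int.natAbs_pos.mpr (ne_of_gt hprodpos); omega
  have hprodN : a.prod = (N : Int) := by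
    rw [hN, Int.natCast_natAbs, abs_of_pos hprodpos]
  -- A's first loop computes the product
  have hApy : (PySem.List.pyRange 0 (PySem.List.len a)).foldl
      (fun acc i => acc * PySem.List.pyGetD a i 0) 1 = (N : Int) := by
    rw [PySem.List.foldl_pyRange_pyGetD a 0 (fun acc x => acc * x) 1 (le_refl 0)]
    simpa [hfold] using hprodN
  rw [pvAVal a n N hNpos hApy]
  -- B's result
  unfold countDivisorsMult_alt
  rw [pvBFold a _ hnz]
  set L := a.flatMap (fun v => (Nat.primeFactorsList v.natAbs).map (fun q : Nat => (q : Int))) with hL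
  rw [PySem.Dict.foldl_insert_getD_add_one_eq_counter]
  have hvals : (PySem.Dict.counter L).values = ((PySem.Dict.counter L).items).map (fun p => p.2) := rfl
  simp only [hvals, PySem.Dict.items_counter, pvFoldlMul, one_mul, List.map_map]
  -- the two prime multisets coincide
  set PA : List Int := (Nat.primeFactorsList N).map (fun q : Nat => (q : Int)) with hPA
  have hperm : PA.Perm L := by
    have h1 : (N.primeFactorsList).Perm ((a.map Int.natAbs).flatMap Nat.primeFactorsList) := by
      have hNe : N = (a.map Int.natAbs).prod := by rw [hN, pvNatAbsProd]
      rw [hNe]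
      apply pvPermNat
      intro m hm
      simp only [List.mem_map] at hm
      obtain ⟨x, hx, rfl⟩ := hm
      exact Int.natAbs_ne_zero.mpr (hnz x hx)
    have h3 : L = ((a.map Int.natAbs).flatMap Nat.primeFactorsList).map (fun q : Nat => (q : Int)) := by
      rw [hL, List.flatMap_map, List.map_flatMap]
    rw [h3, hPA]
    exact h1.map _
  have hsperm : (PySem.Set.ofList PA).Perm (PySem.Set.ofList L) := by
    rw [List.perm_ext_iff_of_nodup (PySem.Set.nodup_ofList _) (PySem.Set.nodup_ofList _)]
    intro k
    rw [PySem.Set.mem_ofList, PySem.Set.mem_ofList]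
    exact hperm.mem_iff
  calc ((PySem.Set.ofList PA).map (fun k => 1 + (PA.count k : Int))).prod
      = ((PySem.Set.ofList L).map (fun k => 1 + (PA.count k : Int))).prod :=
        (hsperm.map _).prod_eq
    _ = _ := by
        congr 1
        apply List.map_congr_left
        intro k _
        simp [hperm.count_eq k, add_comm]
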